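-- pv_equiv track=rewrite | github.com/jacobHaber/CMPSC132_ant | quiz.py | delacer
-- ===== SOURCE A (Python) =====
-- def delacer(word):
--     """splits a word in two following an alternating
--      pattern abababababa...... -> aaaaaa.... and bbbbb....
--      >>> delacer('sugarhigh')
--      ('sgrih', 'uahg')
--      >>> delacer('dcoagt')
--      ('dog', 'cat')
--      >>> delacer('ababababab')
--      ('aaaaa', 'bbbbb')
--      """
--     first = ""
--     second = ""
--
--     answer = ""
--     for x in range(len(word)):
--         if x % 2 == 0:
--             first += word[x]
--         if x % 2 == 1:
--             second += word[x]
--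
--     return first + " "+ second
-- ===== SOURCE B (Python) =====
-- def delacer(word):
--     first = ""
--     second = ""
--     for c in reversed(word):
--         first, second = c + second, first
--     return first + " " + second
-- ===== Notes on version B (the rewrite author's own statement) =====
-- stated objective: simpler
-- what changed: Replaces A's index loop over range(len(word)) with two parity-tested accumulator appends by a single index-free pass over reversed(word) that swaps the two accumulators each step (first, second = c + second, first), eliminating indexing and the modulo branches.
import Mathlib
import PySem

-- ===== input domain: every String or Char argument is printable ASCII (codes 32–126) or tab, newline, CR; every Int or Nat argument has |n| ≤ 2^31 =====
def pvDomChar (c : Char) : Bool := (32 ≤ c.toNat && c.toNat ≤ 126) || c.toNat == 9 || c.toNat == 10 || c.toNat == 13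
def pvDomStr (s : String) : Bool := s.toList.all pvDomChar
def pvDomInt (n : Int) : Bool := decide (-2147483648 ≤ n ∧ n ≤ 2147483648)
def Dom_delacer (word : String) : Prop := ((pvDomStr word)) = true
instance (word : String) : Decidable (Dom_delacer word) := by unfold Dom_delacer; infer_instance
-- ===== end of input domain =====

-- B replaces A's indexed loop with a parity test by a single right-to-left swap fold
-- ('first, second = c + second, first'), objective: simpler (no indices, no branching).

-- ===== PORT A =====
-- index loop over range(len(word)), parity-tested appends to two accumulators
def delacer (word : String) : String :=
  let cs := word.toList
  let p := (PySem.List.pyRange 0 cs.length 1).foldl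
    (fun (st : List Char × List Char) x =>
      let st1 := if PySem.Int.mod x 2 == 0 then
          (st.1 ++ [(PySem.List.pyGet? cs x).getD ' '], st.2) else st
      if PySem.Int.mod x 2 == 1 then
          (st1.1, st1.2 ++ [(PySem.List.pyGet? cs x).getD ' ']) else st1)
    ([], [])
  String.ofList (p.1 ++ ' ' :: p.2)

-- ===== PORT B =====
-- loop over reversed(word), state swap: first, second = c + second, first
def delacer_alt (word : String) : String :=
  let p := word.toList.reverse.foldl
    (fun (st : List Char × List Char) c => (c :: st.2, st.1)) ([], [])
  String.ofList (p.1 ++ ' ' :: p.2)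

-- ===== PRECONDITION & SPEC =====
def Spec_delacer (word : String) (out : String) : Prop := out = delacer_alt word
instance (word : String) (out : String) : Decidable (Spec_delacer word out) := by unfold Spec_delacer; infer_instance

-- ===== CLAIM (what is proved, stated in full; the proofs are below) =====
def Claim_equal_delacer : Prop := ∀ (word : String), Dom_delacer word → Spec_delacer word (delacer word)

-- ===== LEMMAS AND PROOFS =====

-- B's fold, written as a foldr (the swap step)
def pvStepB (c : Char) (st : List Char × List Char) : List Char × List Char :=
  (c :: st.2, st.1)

-- the swap-foldr with a general seed: the seed's components land at the tails,
-- swapped or not according to the parity of the list length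
lemma pvFoldrB_seed (l : List Char) (x y : List Char) :
    l.foldr pvStepB (x, y) =
      ((l.foldr pvStepB ([], [])).1 ++ (if l.length % 2 = 0 then x else y),
       (l.foldr pvStepB ([], [])).2 ++ (if l.length % 2 = 0 then y else x)) := by
  induction l generalizing x y with
  | nil => simp
  | cons a r ih =>
    simp only [List.foldr_cons, pvStepB, ih x y, List.length_cons]
    rcases Nat.even_or_odd r.length with h | h
    · have h2 : r.length % 2 = 0 := Nat.even_iff.mp h
      simp [h2, Nat.succ_mod_two_eq_one_iff.mpr h2]
    · have h2 : r.length % 2 = 1 := Nat.odd_iff.mp h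
      simp [h2, Nat.succ_mod_two_eq_zero_iff.mpr h2]

-- A's fold over range(n) equals B's swap-foldr on the first n characters
lemma pvFoldA_eq (cs : List Char) (n : Nat) (hn : n ≤ cs.length) :
    (PySem.List.pyRange 0 n 1).foldl
      (fun (st : List Char × List Char) x =>
        let st1 := if PySem.Int.mod x 2 == 0 then
            (st.1 ++ [(PySem.List.pyGet? cs x).getD ' '], st.2) else st
        if PySem.Int.mod x 2 == 1 then
            (st1.1, st1.2 ++ [(PySem.List.pyGet? cs x).getD ' ']) else st1)
      ([], [])
    = (cs.take n).foldr pvStepB ([], []) := by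
  induction n with
  | zero => simp
  | succ m ih =>
    have hm : m ≤ cs.length := Nat.le_of_succ_le hn
    have hlt : m < cs.length := hn
    have hrange : PySem.List.pyRange 0 ((m + 1 : Nat) : Int) 1
        = PySem.List.pyRange 0 (m : Nat) 1 ++ [(m : Int)] := by
      have := PySem.List.pyRange_one_succ_right (a := 0) (b := (m : Int))
        (by exact_mod_cast Nat.zero_le m)
      simpa [Int.natCast_succ] using this
    have hget : (PySem.List.pyGet? cs ((m : Nat) : Int)).getD ' ' = cs[m] := by
      simp [PySem.List.pyGet?_natCast, List.getElem?_eq_getElem hlt]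
    have htake : cs.take (m + 1) = cs.take m ++ [cs[m]] := by
      rw [List.take_add_one, List.getElem?_eq_getElem hlt]; rfl
    have hmod : PySem.Int.mod ((m : Nat) : Int) 2 = ((m % 2 : Nat) : Int) := by
      exact_mod_cast PySem.Int.mod_natCast m 2
    rw [hrange, List.foldl_append, ih hm, htake, List.foldr_append]
    simp only [List.foldr_cons, List.foldr_nil]
    have hlen : (cs.take m).length = m := List.length_take_of_le hm
    rcases Nat.even_or_odd m with h | h
    · have h2 : m % 2 = 0 := Nat.even_iff.mp h
      simp only [List.foldl_cons, List.foldl_nil, hmod, h2, hget, pvStepB]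
      norm_num
      rw [pvFoldrB_seed (cs.take m) [cs[m]] []]
      simp [hlen, h2]
    · have h2 : m % 2 = 1 := Nat.odd_iff.mp h
      simp only [List.foldl_cons, List.foldl_nil, hmod, h2, hget, pvStepB]
      norm_num
      rw [pvFoldrB_seed (cs.take m) [cs[m]] []]
      simp [hlen, h2]

-- ===== VERDICT (by name: the statement is the Claim_ definition above) =====
theorem delacer_spec : Claim_equal_delacer := by
  intro word _
  unfold Spec_delacer delacer delacer_alt
  dsimp only
  rw [List.foldl_reverse]
  have h := pvFoldA_eq word.toList word.toList.length le_rfl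
  rw [List.take_length] at h
  rw [h]
  rfl
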